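-- pv_equiv track=rewrite | github.com/Sandesh-Basnet/AuthFort-Sec | src/security/password_adivisor.py | detect_problems
-- ===== SOURCE A (Python) =====
-- import string
--
-- def detect_problems(password):
--     '''Detects specific weaknesses in the password and returns a list of problems.'''
--     problems = []
--
--     if len(password) < 8:
--         problems.append("length")
--     if not any(c.isupper() for c in password):
--         problems.append("upper")
--     if not any(c.islower() for c in password):
--         problems.append("lower")
--     if not any(c.isdigit() for c in password):
--         problems.append("digit")
--     if not any(c in string.punctuation for c in password):
--         problems.append("symbol")
--
--     return problems
-- ===== SOURCE B (Python) =====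
-- import string
--
-- def detect_problems(password):
--     has_upper = has_lower = has_digit = has_symbol = False
--     for c in password:
--         if c.isupper():
--             has_upper = True
--         if c.islower():
--             has_lower = True
--         if c.isdigit():
--             has_digit = True
--         if c in string.punctuation:
--             has_symbol = True
--     problems = []
--     if len(password) < 8:
--         problems.append("length")
--     if not has_upper:
--         problems.append("upper")
--     if not has_lower:
--         problems.append("lower")
--     if not has_digit:
--         problems.append("digit")
--     if not has_symbol:
--         problems.append("symbol")
--     return problems
-- ===== Notes on version B (the rewrite author's own statement) =====
-- stated objective: simpler
-- what changed: B replaces A's four separate any(...) scans over the password with a single pass maintaining four boolean flags, then assembles the problems list from the flags in the same order.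
import Mathlib
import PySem

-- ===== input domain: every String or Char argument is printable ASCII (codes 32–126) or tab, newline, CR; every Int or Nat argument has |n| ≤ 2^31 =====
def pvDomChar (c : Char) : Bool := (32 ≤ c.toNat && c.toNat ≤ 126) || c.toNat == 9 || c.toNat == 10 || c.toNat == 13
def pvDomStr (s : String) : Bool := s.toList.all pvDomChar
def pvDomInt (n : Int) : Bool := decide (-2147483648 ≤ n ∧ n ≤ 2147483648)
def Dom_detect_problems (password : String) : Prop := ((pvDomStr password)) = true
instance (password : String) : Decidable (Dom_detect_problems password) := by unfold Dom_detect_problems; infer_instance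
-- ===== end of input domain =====

-- B replaces A's four separate any(...) scans with a single pass keeping four boolean
-- flags; the problems list is assembled from the flags in the same order (simpler).

-- string.punctuation (shared constant, as in both Pythons)
def pvPunct : List Char := "!\"#$%&'()*+,-./:;<=>?@[\\]^_`{|}~".toList

-- ===== PORT A =====
def detect_problems (password : String) : List String :=
  let cs := password.toList
  let problems : List String := []
  let problems := if PySem.Chars.len cs < 8 then problems ++ ["length"] else problems
  let problems := if !(cs.any (fun c => PySem.Chars.isupper c)) then problems ++ ["upper"] else problems
  let problems := if !(cs.any (fun c => PySem.Chars.islower c)) then problems ++ ["lower"] else problems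
  let problems := if !(cs.any (fun c => PySem.Chars.isdigit c)) then problems ++ ["digit"] else problems
  let problems := if !(cs.any (fun c => pvPunct.contains c)) then problems ++ ["symbol"] else problems
  problems

-- ===== PORT B =====
def detect_problems_alt (password : String) : List String :=
  let cs := password.toList
  let st := cs.foldl
    (fun (s : Bool × Bool × Bool × Bool) c =>
      (s.1 || PySem.Chars.isupper c,
       s.2.1 || PySem.Chars.islower c,
       s.2.2.1 || PySem.Chars.isdigit c,
       s.2.2.2 || pvPunct.contains c))
    (false, false, false, false)
  (if PySem.Chars.len cs < 8 then ["length"] else []) ++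
  (if st.1 then [] else ["upper"]) ++
  (if st.2.1 then [] else ["lower"]) ++
  (if st.2.2.1 then [] else ["digit"]) ++
  (if st.2.2.2 then [] else ["symbol"])

-- ===== PRECONDITION & SPEC =====
def Spec_detect_problems (password : String) (out : List String) : Prop := out = detect_problems_alt password
instance (password : String) (out : List String) : Decidable (Spec_detect_problems password out) := by unfold Spec_detect_problems; infer_instance

-- ===== CLAIM (what is proved, stated in full; the proofs are below) =====
def Claim_equal_detect_problems : Prop := ∀ (password : String), Dom_detect_problems password → Spec_detect_problems password (detect_problems password)

-- ===== LEMMAS AND PROOFS =====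

theorem pv_fold_flags (cs : List Char) (b1 b2 b3 b4 : Bool) :
    cs.foldl
      (fun (s : Bool × Bool × Bool × Bool) c =>
        (s.1 || PySem.Chars.isupper c,
         s.2.1 || PySem.Chars.islower c,
         s.2.2.1 || PySem.Chars.isdigit c,
         s.2.2.2 || pvPunct.contains c))
      (b1, b2, b3, b4)
    = (b1 || cs.any (fun c => PySem.Chars.isupper c),
       b2 || cs.any (fun c => PySem.Chars.islower c),
       b3 || cs.any (fun c => PySem.Chars.isdigit c),
       b4 || cs.any (fun c => pvPunct.contains c)) := by
  induction cs generalizing b1 b2 b3 b4 with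
  | nil => simp
  | cons c cs ih =>
      simp only [List.foldl_cons, List.any_cons, ih, Bool.or_assoc]

-- ===== VERDICT (by name: the statement is the Claim_ definition above) =====
theorem detect_problems_spec : Claim_equal_detect_problems := by
  unfold Claim_equal_detect_problems
  intro password _
  unfold Spec_detect_problems detect_problems detect_problems_alt
  simp only [pv_fold_flags, Bool.false_or]
  cases hu : (password.toList.any fun c => PySem.Chars.isupper c) <;>
    cases hl : (password.toList.any fun c => PySem.Chars.islower c) <;>
      cases hd : (password.toList.any fun c => PySem.Chars.isdigit c) <;>
        cases hs : (password.toList.any fun c => pvPunct.contains c) <;>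
          by_cases hlen : PySem.Chars.len password.toList < 8 <;>
            simp_all
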